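-- pv_equiv track=rewrite | github.com/DicodeGier/python-codes | CP for EOR/midterm 2019/answers/2019/Q7/using input and leaving main.py | GetAnimal
-- ===== SOURCE A (Python) =====
-- def GetAnimal(year):
--     YearNames = [["Dragon",2000],["Snake",2001],["Horse",2002],["Sheep",2003],["Monkey",2004],["Rooster",2005],["Dog",2006],["Pig",2007],["Rat",2008],["Ox",2009],["Tiger",2010],["Hare",2011]]
--     animals, years = map(list,zip(*YearNames))
--
--     if year >= 0:
--         for i in range(0,8):
--             if year % 12 == i:
--                 return animals[4+i]
--         for i in range(8,12):
--             if year % 12 == i: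
--                 return animals[i-8]
--     else:
--         return "NA"
-- ===== SOURCE B (Python) =====
-- ANIMALS_BY_REM = ["Monkey", "Rooster", "Dog", "Pig", "Rat", "Ox",
--                   "Tiger", "Hare", "Dragon", "Snake", "Horse", "Sheep"]
--
--
-- def GetAnimal(year):
--     if year >= 0:
--         return ANIMALS_BY_REM[year % 12]
--     return "NA"
-- ===== Notes on version B (the rewrite author's own statement) =====
-- stated objective: simpler
-- what changed: Replaced the two scanning loops (with their rotated indexing over a year-keyed table) by a single direct index into a remainder-ordered list, removing all loops.
import Mathlib
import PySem

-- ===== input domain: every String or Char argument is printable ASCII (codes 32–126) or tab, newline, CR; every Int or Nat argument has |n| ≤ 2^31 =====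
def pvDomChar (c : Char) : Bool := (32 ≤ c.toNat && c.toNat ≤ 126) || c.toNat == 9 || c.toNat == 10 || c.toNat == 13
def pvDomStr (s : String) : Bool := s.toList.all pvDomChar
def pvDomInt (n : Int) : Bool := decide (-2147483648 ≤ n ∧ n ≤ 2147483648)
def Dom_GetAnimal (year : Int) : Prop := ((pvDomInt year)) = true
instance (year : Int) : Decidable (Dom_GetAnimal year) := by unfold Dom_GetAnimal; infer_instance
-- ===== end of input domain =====

-- B replaces A's two rotated scanning loops with one direct index into a remainder-ordered list (simpler; return value only).
-- ===== PORT A =====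
-- literal transliteration: the two 'for i in range(...)' early-return loops become findSome? over pyRange;
-- the trailing 'none => ""' branches are Python's implicit None fall-through, unreachable for int year (year % 12 ∈ 0..11).
def GetAnimal (year : Int) : String :=
  let animals : List String := ["Dragon","Snake","Horse","Sheep","Monkey","Rooster","Dog","Pig","Rat","Ox","Tiger","Hare"]
  if year ≥ 0 then
    match (PySem.List.pyRange 0 8 1).findSome?
        (fun i => if PySem.Int.mod year 12 = i then PySem.List.pyGet? animals (4 + i) else none) with
    | some s => s
    | none =>
      match (PySem.List.pyRange 8 12 1).findSome?
          (fun i => if PySem.Int.mod year 12 = i then PySem.List.pyGet? animals (i - 8) else none) with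
      | some s => s
      | none => ""
  else "NA"

-- ===== PORT B =====
-- direct lookup: ANIMALS_BY_REM[year % 12]; the 'none' branch is Python's IndexError, unreachable (0 ≤ year % 12 < 12)
def GetAnimal_alt (year : Int) : String :=
  if year ≥ 0 then
    match PySem.List.pyGet? ["Monkey","Rooster","Dog","Pig","Rat","Ox","Tiger","Hare","Dragon","Snake","Horse","Sheep"] (PySem.Int.mod year 12) with
    | some s => s
    | none => ""
  else "NA"

-- ===== PRECONDITION & SPEC =====
def Spec_GetAnimal (year : Int) (out : String) : Prop := out = GetAnimal_alt year
instance (year : Int) (out : String) : Decidable (Spec_GetAnimal year out) := by unfold Spec_GetAnimal; infer_instance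

-- ===== CLAIM (what is proved, stated in full; the proofs are below) =====
def Claim_equal_GetAnimal : Prop := ∀ (year : Int), Dom_GetAnimal year → Spec_GetAnimal year (GetAnimal year)

-- ===== LEMMAS AND PROOFS =====

-- ===== VERDICT (by name: the statement is the Claim_ definition above) =====
theorem GetAnimal_spec : Claim_equal_GetAnimal := by
  intro year _
  unfold Spec_GetAnimal GetAnimal GetAnimal_alt
  by_cases h : year ≥ 0
  · simp only [h, if_pos]
    have hm : PySem.Int.mod year 12 = year % 12 := PySem.Int.mod_eq_emod_of_pos (by norm_num)
    have h0 : 0 ≤ year % 12 := Int.emod_nonneg year (by norm_num)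
    have h1 : year % 12 < 12 := Int.emod_lt_of_pos year (by norm_num)
    rw [hm]
    interval_cases h : year % 12 <;> decide
  · simp [h]
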